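-- pv_equiv track=rewrite | github.com/EndOfSource/hack-25-pdf-to-md | modules/peat_knowledge_graph.py | _are_related_chunk_types
-- ===== SOURCE A (Python) =====
-- def _are_related_chunk_types(chunk_type1: str, chunk_type2: str) -> bool:
--     """Determine if two chunk types are conceptually related."""
--     related_groups = [
--         {'risk_management', 'safety_security'},
--         {'governance', 'stakeholder_management'},
--         {'schedule', 'technical_management'},
--         {'financial_management', 'cost_management'},
--         {'commercial_management', 'procurement'},
--         {'benefits_management', 'stakeholder_management'}
--     ]
--
--     for group in related_groups:
--         if chunk_type1 in group and chunk_type2 in group: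
--             return True
--     return False
-- ===== SOURCE B (Python) =====
-- _RELATED_GROUPS = [
--     ('risk_management', 'safety_security'),
--     ('governance', 'stakeholder_management'),
--     ('schedule', 'technical_management'),
--     ('financial_management', 'cost_management'),
--     ('commercial_management', 'procurement'),
--     ('benefits_management', 'stakeholder_management'),
-- ]
--
-- # Build the membership index once: each type maps to the union of every group
-- # it belongs to (including itself).
-- _RELATED_INDEX = {}
-- for _group in _RELATED_GROUPS:
--     for _member in _group:
--         _RELATED_INDEX.setdefault(_member, set()).update(_group)
--
--
-- def _are_related_chunk_types(chunk_type1: str, chunk_type2: str) -> bool: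
--     """Determine if two chunk types are conceptually related."""
--     return chunk_type2 in _RELATED_INDEX.get(chunk_type1, set())
-- ===== Notes on version B (the rewrite author's own statement) =====
-- stated objective: idiomatic
-- what changed: B precomputes once, at module load, a dict mapping each chunk type to the union of every group containing it (setdefault/update over the groups), so each call is a single dict lookup plus set membership instead of A's per-call scan over the six group sets.
import Mathlib
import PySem

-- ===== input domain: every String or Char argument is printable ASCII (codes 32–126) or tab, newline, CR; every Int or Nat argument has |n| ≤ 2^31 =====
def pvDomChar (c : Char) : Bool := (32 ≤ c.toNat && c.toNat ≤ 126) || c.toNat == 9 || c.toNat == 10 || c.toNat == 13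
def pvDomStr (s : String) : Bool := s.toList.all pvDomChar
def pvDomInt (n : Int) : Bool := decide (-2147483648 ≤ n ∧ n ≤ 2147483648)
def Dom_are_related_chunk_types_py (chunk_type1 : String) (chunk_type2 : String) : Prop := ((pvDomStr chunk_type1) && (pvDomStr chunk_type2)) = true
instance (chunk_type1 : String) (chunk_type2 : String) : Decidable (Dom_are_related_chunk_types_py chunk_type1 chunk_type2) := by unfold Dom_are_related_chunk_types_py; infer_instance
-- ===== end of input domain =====

-- B replaces A's per-call scan over the list of related groups with a relatedness index
-- (each chunk type mapped to the union of every group containing it) built once, then a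
-- single lookup-and-membership per call (objective: idiomatic/constant-factor lookup shape).

-- ===== PORT A =====
-- the six related groups, Python set literals in written order
def pvGroupsA : List (PySem.Set String) :=
  [PySem.Set.ofList ["risk_management", "safety_security"],
   PySem.Set.ofList ["governance", "stakeholder_management"],
   PySem.Set.ofList ["schedule", "technical_management"],
   PySem.Set.ofList ["financial_management", "cost_management"],
   PySem.Set.ofList ["commercial_management", "procurement"],
   PySem.Set.ofList ["benefits_management", "stakeholder_management"]]

-- A's 'for group in related_groups: if t1 in group and t2 in group: return True' loop
def pvLoopA (t1 t2 : String) : List (PySem.Set String) → Bool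
  | [] => false
  | g :: gs => if PySem.Set.contains g t1 && PySem.Set.contains g t2 then true else pvLoopA t1 t2 gs

def are_related_chunk_types_py (chunk_type1 : String) (chunk_type2 : String) : Bool :=
  pvLoopA chunk_type1 chunk_type2 pvGroupsA

-- ===== PORT B =====
-- Source B's _RELATED_GROUPS (tuples in written order)
def pvRelatedGroups : List (List String) :=
  [["risk_management", "safety_security"],
   ["governance", "stakeholder_management"],
   ["schedule", "technical_management"],
   ["financial_management", "cost_management"],
   ["commercial_management", "procurement"],
   ["benefits_management", "stakeholder_management"]]

-- Source B's module-level index build: for group: for member: index.setdefault(member, set()).update(group)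
def pvRelatedIndex : PySem.Dict String (PySem.Set String) :=
  pvRelatedGroups.foldl
    (fun d group => group.foldl
      (fun d member =>
        d.insert member (PySem.Set.update (d.getD member PySem.Set.empty) group)) d)
    PySem.Dict.empty

def are_related_chunk_types_py_alt (chunk_type1 : String) (chunk_type2 : String) : Bool :=
  PySem.Set.contains (pvRelatedIndex.getD chunk_type1 PySem.Set.empty) chunk_type2

-- ===== PRECONDITION & SPEC =====
def Spec_are_related_chunk_types_py (chunk_type1 : String) (chunk_type2 : String) (out : Bool) : Prop := out = are_related_chunk_types_py_alt chunk_type1 chunk_type2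
instance (chunk_type1 : String) (chunk_type2 : String) (out : Bool) : Decidable (Spec_are_related_chunk_types_py chunk_type1 chunk_type2 out) := by unfold Spec_are_related_chunk_types_py; infer_instance

-- ===== CLAIM (what is proved, stated in full; the proofs are below) =====
def Claim_equal_are_related_chunk_types_py : Prop := ∀ (chunk_type1 : String) (chunk_type2 : String), Dom_are_related_chunk_types_py chunk_type1 chunk_type2 → Spec_are_related_chunk_types_py chunk_type1 chunk_type2 (are_related_chunk_types_py chunk_type1 chunk_type2)

-- ===== LEMMAS AND PROOFS =====
-- main equality, by exhausting the 11 chunk types the groups mention (plus the default case)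
theorem pv_main (t1 t2 : String) :
    are_related_chunk_types_py t1 t2 = are_related_chunk_types_py_alt t1 t2 := by
  by_cases h0 : t1 = "risk_management"
  · subst h0
    simp [are_related_chunk_types_py, are_related_chunk_types_py_alt, pvLoopA, pvGroupsA,
      pvRelatedIndex, pvRelatedGroups, PySem.Set.contains, PySem.Set.ofList, PySem.Set.add,
      PySem.Set.update, PySem.Dict.getD, PySem.Dict.insert, PySem.Dict.get?, PySem.Dict.empty]
  by_cases h1 : t1 = "safety_security"
  · subst h1
    simp [are_related_chunk_types_py, are_related_chunk_types_py_alt, pvLoopA, pvGroupsA,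
      pvRelatedIndex, pvRelatedGroups, PySem.Set.contains, PySem.Set.ofList, PySem.Set.add,
      PySem.Set.update, PySem.Dict.getD, PySem.Dict.insert, PySem.Dict.get?, PySem.Dict.empty]
  by_cases h2 : t1 = "governance"
  · subst h2
    simp [are_related_chunk_types_py, are_related_chunk_types_py_alt, pvLoopA, pvGroupsA,
      pvRelatedIndex, pvRelatedGroups, PySem.Set.contains, PySem.Set.ofList, PySem.Set.add,
      PySem.Set.update, PySem.Dict.getD, PySem.Dict.insert, PySem.Dict.get?, PySem.Dict.empty]
  by_cases h3 : t1 = "stakeholder_management"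
  · subst h3
    simp [are_related_chunk_types_py, are_related_chunk_types_py_alt, pvLoopA, pvGroupsA,
      pvRelatedIndex, pvRelatedGroups, PySem.Set.contains, PySem.Set.ofList, PySem.Set.add,
      PySem.Set.update, PySem.Dict.getD, PySem.Dict.insert, PySem.Dict.get?, PySem.Dict.empty, Bool.or_comm, Bool.or_left_comm]
  by_cases h4 : t1 = "schedule"
  · subst h4
    simp [are_related_chunk_types_py, are_related_chunk_types_py_alt, pvLoopA, pvGroupsA,
      pvRelatedIndex, pvRelatedGroups, PySem.Set.contains, PySem.Set.ofList, PySem.Set.add,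
      PySem.Set.update, PySem.Dict.getD, PySem.Dict.insert, PySem.Dict.get?, PySem.Dict.empty]
  by_cases h5 : t1 = "technical_management"
  · subst h5
    simp [are_related_chunk_types_py, are_related_chunk_types_py_alt, pvLoopA, pvGroupsA,
      pvRelatedIndex, pvRelatedGroups, PySem.Set.contains, PySem.Set.ofList, PySem.Set.add,
      PySem.Set.update, PySem.Dict.getD, PySem.Dict.insert, PySem.Dict.get?, PySem.Dict.empty]
  by_cases h6 : t1 = "financial_management"
  · subst h6
    simp [are_related_chunk_types_py, are_related_chunk_types_py_alt, pvLoopA, pvGroupsA,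
      pvRelatedIndex, pvRelatedGroups, PySem.Set.contains, PySem.Set.ofList, PySem.Set.add,
      PySem.Set.update, PySem.Dict.getD, PySem.Dict.insert, PySem.Dict.get?, PySem.Dict.empty]
  by_cases h7 : t1 = "cost_management"
  · subst h7
    simp [are_related_chunk_types_py, are_related_chunk_types_py_alt, pvLoopA, pvGroupsA,
      pvRelatedIndex, pvRelatedGroups, PySem.Set.contains, PySem.Set.ofList, PySem.Set.add,
      PySem.Set.update, PySem.Dict.getD, PySem.Dict.insert, PySem.Dict.get?, PySem.Dict.empty]
  by_cases h8 : t1 = "commercial_management"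
  · subst h8
    simp [are_related_chunk_types_py, are_related_chunk_types_py_alt, pvLoopA, pvGroupsA,
      pvRelatedIndex, pvRelatedGroups, PySem.Set.contains, PySem.Set.ofList, PySem.Set.add,
      PySem.Set.update, PySem.Dict.getD, PySem.Dict.insert, PySem.Dict.get?, PySem.Dict.empty]
  by_cases h9 : t1 = "procurement"
  · subst h9
    simp [are_related_chunk_types_py, are_related_chunk_types_py_alt, pvLoopA, pvGroupsA,
      pvRelatedIndex, pvRelatedGroups, PySem.Set.contains, PySem.Set.ofList, PySem.Set.add,
      PySem.Set.update, PySem.Dict.getD, PySem.Dict.insert, PySem.Dict.get?, PySem.Dict.empty]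
  by_cases h10 : t1 = "benefits_management"
  · subst h10
    simp [are_related_chunk_types_py, are_related_chunk_types_py_alt, pvLoopA, pvGroupsA,
      pvRelatedIndex, pvRelatedGroups, PySem.Set.contains, PySem.Set.ofList, PySem.Set.add,
      PySem.Set.update, PySem.Dict.getD, PySem.Dict.insert, PySem.Dict.get?, PySem.Dict.empty]
  · have e0 : ("risk_management" == t1) = false := beq_eq_false_iff_ne.mpr (Ne.symm h0)
    have e1 : ("safety_security" == t1) = false := beq_eq_false_iff_ne.mpr (Ne.symm h1)
    have e2 : ("governance" == t1) = false := beq_eq_false_iff_ne.mpr (Ne.symm h2)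
    have e3 : ("stakeholder_management" == t1) = false := beq_eq_false_iff_ne.mpr (Ne.symm h3)
    have e4 : ("schedule" == t1) = false := beq_eq_false_iff_ne.mpr (Ne.symm h4)
    have e5 : ("technical_management" == t1) = false := beq_eq_false_iff_ne.mpr (Ne.symm h5)
    have e6 : ("financial_management" == t1) = false := beq_eq_false_iff_ne.mpr (Ne.symm h6)
    have e7 : ("cost_management" == t1) = false := beq_eq_false_iff_ne.mpr (Ne.symm h7)
    have e8 : ("commercial_management" == t1) = false := beq_eq_false_iff_ne.mpr (Ne.symm h8)
    have e9 : ("procurement" == t1) = false := beq_eq_false_iff_ne.mpr (Ne.symm h9)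
    have e10 : ("benefits_management" == t1) = false := beq_eq_false_iff_ne.mpr (Ne.symm h10)
    simp [are_related_chunk_types_py, are_related_chunk_types_py_alt, pvLoopA, pvGroupsA,
      pvRelatedIndex, pvRelatedGroups, PySem.Set.contains, PySem.Set.ofList, PySem.Set.add,
      PySem.Set.update, PySem.Dict.getD, PySem.Dict.insert, PySem.Dict.get?, PySem.Dict.empty,
      List.find?, h0, h1, h2, h3, h4, h5, h6, h7, h8, h9, h10, e0, e1, e2, e3, e4, e5, e6, e7, e8, e9, e10]

-- ===== VERDICT (by name: the statement is the Claim_ definition above) =====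
theorem are_related_chunk_types_py_spec : Claim_equal_are_related_chunk_types_py := by
  intro t1 t2 _
  exact pv_main t1 t2
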